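-- pv_equiv track=rewrite | github.com/jengo998/Othello | project_5_game_logic.py | _makemove_down
-- ===== SOURCE A (Python) =====
-- def _check_enemy_column(enemy_turn: str, player_turn: str, board: list, begin_piece: int,
--                         common_index: int, end_piece: int) -> list:
--     '''Checks whether enemy pieces are between 2 player pieces in a column
--     and returns the index of those consecutive enemy pieces'''
--
--     result = []
--
--     for enemy_piece in range(begin_piece, end_piece):
--         if board[enemy_piece][common_index] == enemy_turn:
--             result.append(enemy_piece)
--
--         elif board[enemy_piece][common_index] == player_turn:
--             result = []
--             result.extend(_check_enemy_column(enemy_turn, player_turn, board, enemy_piece+1, common_index, end_piece))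
--
--         elif board[enemy_piece][common_index] == '.':
--             result = []
--             return result
--
--     return result
--
-- def _makemove_down(board: list, player_move: list, enemy_turn: str, player_turn: str, rownum: int) -> list:
--     '''Flips enemy pieces downwards if the move is legal'''
--
--     for piece in range(player_move[0], rownum):
--
--         if board[(player_move[0]+1)][(player_move[1])] == enemy_turn:
--             if board[piece][player_move[1]] == player_turn:
--
--                 enemy_pieces = _check_enemy_column(enemy_turn, player_turn, board,
--                                                    player_move[0]+1, player_move[1], piece)
--
--                 for enemy_piece in enemy_pieces:
--                     board[enemy_piece][player_move[1]] = player_turn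
--
--     return board
-- ===== SOURCE B (Python) =====
-- def _makemove_down(board: list, player_move: list, enemy_turn: str, player_turn: str, rownum: int) -> list:
--     '''Flips enemy pieces downwards if the move is legal by a single downward scan.
--     Mutates board in place exactly like the original and returns it.'''
--     r = player_move[0]
--     if rownum <= r:
--         return board
--     c = player_move[1]
--     if board[r + 1][c] != enemy_turn:
--         return board
--     for k in range(r + 1, rownum):
--         cell = board[k][c]
--         if cell == enemy_turn:
--             continue
--         if cell == player_turn:
--             for i in range(r + 1, k):
--                 if board[i][c] == enemy_turn:
--                     board[i][c] = player_turn
--             break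
--         if cell == '.':
--             break
--     return board
-- ===== Notes on version B (the rewrite author's own statement) =====
-- stated objective: simpler
-- what changed: Replaces A's outer loop, which re-runs the recursive _check_enemy_column scan (and redundantly re-flips) at every candidate row below the move, by one plain downward scan that stops at the first player piece or '.' and flips the enemy run exactly once, with no helper and no recursion.
-- outside the precondition, e.g. on _makemove_down([['B'], ['W']], [-2, 0], 'W', 'B', 2): A returns [['B'], ['B']], B returns [['B'], ['B']]
import Mathlib
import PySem

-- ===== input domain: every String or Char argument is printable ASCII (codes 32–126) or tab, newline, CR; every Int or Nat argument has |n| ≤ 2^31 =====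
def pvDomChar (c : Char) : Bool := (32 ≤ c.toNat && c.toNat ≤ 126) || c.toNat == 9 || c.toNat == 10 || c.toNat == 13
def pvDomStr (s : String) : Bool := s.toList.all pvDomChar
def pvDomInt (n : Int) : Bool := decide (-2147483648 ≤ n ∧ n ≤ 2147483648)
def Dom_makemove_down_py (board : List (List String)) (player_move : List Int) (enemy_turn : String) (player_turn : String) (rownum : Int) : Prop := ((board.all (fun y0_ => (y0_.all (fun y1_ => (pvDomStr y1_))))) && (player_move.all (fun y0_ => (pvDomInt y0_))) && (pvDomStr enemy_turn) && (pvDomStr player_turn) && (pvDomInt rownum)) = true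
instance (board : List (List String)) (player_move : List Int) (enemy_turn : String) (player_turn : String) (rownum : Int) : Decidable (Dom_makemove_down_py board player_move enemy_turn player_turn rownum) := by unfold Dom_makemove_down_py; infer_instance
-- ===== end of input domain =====

-- B replaces A's loop-with-recursive-rescan (_check_enemy_column re-run at every candidate
-- row) by one downward scan that stops at the first player piece or '.' and flips the enemy
-- run once; both programs mutate `board` in place in the same way and return it.

-- shared Python primitives: xs[i] (int), board[i][c] read, board[i][c] = v write
def pvIdx (xs : List Int) (i : Int) : Int := (PySem.List.pyGet? xs i).getD 0

def pvCell (b : List (List String)) (i c : Int) : String :=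
  (PySem.List.pyGet? ((PySem.List.pyGet? b i).getD []) c).getD ""

def pvSetCell (b : List (List String)) (i c : Int) (v : String) : List (List String) :=
  PySem.List.pySetD b i (PySem.List.pySetD ((PySem.List.pyGet? b i).getD []) c v)

-- ===== PORT A =====
-- _check_enemy_column: the loop `for enemy_piece in range(begin_piece, end_piece)` is fuel
-- recursion; the fuel is (end_piece - i).toNat, so the recursive Python call with
-- begin_piece = i+1 carries fuel n.
def pvCheckCol (enemy_turn player_turn : String) (board : List (List String)) (common_index : Int) :
    Nat → Int → List Int → List Int
  | 0, _, result => result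
  | n+1, i, result =>
    if pvCell board i common_index = enemy_turn then
      pvCheckCol enemy_turn player_turn board common_index n (i+1) (result ++ [i])
    else if pvCell board i common_index = player_turn then
      -- result = []; result.extend(recursive call); then the loop continues
      pvCheckCol enemy_turn player_turn board common_index n (i+1)
        (pvCheckCol enemy_turn player_turn board common_index n (i+1) [])
    else if pvCell board i common_index = "." then []
    else pvCheckCol enemy_turn player_turn board common_index n (i+1) result

-- the outer `for piece in range(player_move[0], rownum)` loop of _makemove_down
def pvDownLoop (player_move : List Int) (enemy_turn player_turn : String) :
    Nat → Int → List (List String) → List (List String)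
  | 0, _, board => board
  | n+1, piece, board =>
    let board' :=
      if pvCell board (pvIdx player_move 0 + 1) (pvIdx player_move 1) = enemy_turn then
        if pvCell board piece (pvIdx player_move 1) = player_turn then
          (pvCheckCol enemy_turn player_turn board (pvIdx player_move 1)
              ((piece - (pvIdx player_move 0 + 1)).toNat) (pvIdx player_move 0 + 1) []).foldl
            (fun b j => pvSetCell b j (pvIdx player_move 1) player_turn) board
        else board
      else board
    pvDownLoop player_move enemy_turn player_turn n (piece+1) board'

def makemove_down_py (board : List (List String)) (player_move : List Int) (enemy_turn : String) (player_turn : String) (rownum : Int) : List (List String) :=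
  pvDownLoop player_move enemy_turn player_turn
    ((rownum - pvIdx player_move 0).toNat) (pvIdx player_move 0) board

-- ===== PORT B =====
-- the flip loop `for i in range(r+1, k)` of Source B
def pvFlip (enemy_turn player_turn : String) (c : Int) :
    Nat → Int → List (List String) → List (List String)
  | 0, _, board => board
  | n+1, i, board =>
    if pvCell board i c = enemy_turn then
      pvFlip enemy_turn player_turn c n (i+1) (pvSetCell board i c player_turn)
    else pvFlip enemy_turn player_turn c n (i+1) board

-- the scan loop `for k in range(r+1, rownum)` of Source B (flip-and-break at a player piece,
-- break at '.')
def pvScan (enemy_turn player_turn : String) (r c : Int) :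
    Nat → Int → List (List String) → List (List String)
  | 0, _, board => board
  | n+1, k, board =>
    if pvCell board k c = enemy_turn then pvScan enemy_turn player_turn r c n (k+1) board
    else if pvCell board k c = player_turn then
      pvFlip enemy_turn player_turn c ((k - (r+1)).toNat) (r+1) board
    else if pvCell board k c = "." then board
    else pvScan enemy_turn player_turn r c n (k+1) board

def makemove_down_py_alt (board : List (List String)) (player_move : List Int) (enemy_turn : String) (player_turn : String) (rownum : Int) : List (List String) :=
  let r := pvIdx player_move 0
  if rownum ≤ r then board
  else
    let c := pvIdx player_move 1
    if pvCell board (r+1) c ≠ enemy_turn then board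
    else pvScan enemy_turn player_turn r c ((rownum - (r+1)).toNat) (r+1) board

-- ===== PRECONDITION & SPEC =====
-- Pre_ excludes the inputs on which Python A raises (player_move shorter than it reads,
-- out-of-range rows or columns) and the inputs whose indices are negative or reach past the
-- board, which A only survives through negative-index wraparound or its lazily re-checked
-- guard: those are outside the natural in-bounds Othello domain.
def Pre_makemove_down_py (board : List (List String)) (player_move : List Int) (enemy_turn : String) (player_turn : String) (rownum : Int) : Prop :=
  1 ≤ player_move.length ∧
  (rownum ≤ pvIdx player_move 0 ∨
    (2 ≤ player_move.length ∧ 0 ≤ pvIdx player_move 0 ∧ 0 ≤ pvIdx player_move 1 ∧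
     pvIdx player_move 0 + 1 < (board.length : Int) ∧
     pvIdx player_move 1 < ((board.getD (pvIdx player_move 0 + 1).toNat []).length : Int) ∧
     (pvCell board (pvIdx player_move 0 + 1) (pvIdx player_move 1) ≠ enemy_turn ∨
       (rownum ≤ (board.length : Int) ∧
        ∀ d ∈ List.range board.length,
          pvIdx player_move 0 ≤ (d : Int) → (d : Int) < rownum →
          pvIdx player_move 1 < ((board.getD d []).length : Int)))))
instance (board : List (List String)) (player_move : List Int) (enemy_turn : String) (player_turn : String) (rownum : Int) : Decidable (Pre_makemove_down_py board player_move enemy_turn player_turn rownum) := by unfold Pre_makemove_down_py; infer_instance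

def pvWitness_makemove_down_py : List (List String) × List Int × String × String × Int :=
  ([["."], ["W"], ["B"]], [0, 0], "W", "B", 3)

def Spec_makemove_down_py (board : List (List String)) (player_move : List Int) (enemy_turn : String) (player_turn : String) (rownum : Int) (out : List (List String)) : Prop := out = makemove_down_py_alt board player_move enemy_turn player_turn rownum
instance (board : List (List String)) (player_move : List Int) (enemy_turn : String) (player_turn : String) (rownum : Int) (out : List (List String)) : Decidable (Spec_makemove_down_py board player_move enemy_turn player_turn rownum out) := by unfold Spec_makemove_down_py; infer_instance

-- ===== CLAIM (what is proved, stated in full; the proofs are below) =====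
def Claim_equal_makemove_down_py : Prop := ∀ (board : List (List String)) (player_move : List Int) (enemy_turn : String) (player_turn : String) (rownum : Int), Dom_makemove_down_py board player_move enemy_turn player_turn rownum → Pre_makemove_down_py board player_move enemy_turn player_turn rownum → Spec_makemove_down_py board player_move enemy_turn player_turn rownum (makemove_down_py board player_move enemy_turn player_turn rownum)

-- ===== LEMMAS AND PROOFS =====

-- Python list write with a nonnegative index, in set/toNat normal form
theorem pvPySetD_nonneg {α : Type} (xs : List α) (i : Int) (v : α) (h : 0 ≤ i) :
    PySem.List.pySetD xs i v = xs.set i.toNat v := by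
  unfold PySem.List.pySetD PySem.List.pySet? PySem.List.pyIdx?
  by_cases hlt : i < (xs.length : Int)
  · simp [h, hlt]
  · simp [h, hlt, List.set_eq_of_length_le (by omega : xs.length ≤ i.toNat)]

theorem pvCell_nonneg (b : List (List String)) (i c : Int) (hi : 0 ≤ i) (hc : 0 ≤ c) :
    pvCell b i c = (b.getD i.toNat []).getD c.toNat "" := by
  simp [pvCell, PySem.List.pyGet?_of_nonneg _ hi, PySem.List.pyGet?_of_nonneg _ hc,
    List.getD_eq_getElem?_getD]

theorem pvSetCell_nonneg (b : List (List String)) (i c : Int) (v : String) (hi : 0 ≤ i) :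
    pvSetCell b i c v = b.set i.toNat (PySem.List.pySetD (b.getD i.toNat []) c v) := by
  simp [pvSetCell, pvPySetD_nonneg _ _ _ hi, PySem.List.pyGet?_of_nonneg _ hi,
    List.getD_eq_getElem?_getD]

theorem pvLen_setCell (b : List (List String)) (i c : Int) (v : String) :
    (pvSetCell b i c v).length = b.length := by
  simp [pvSetCell, PySem.List.length_pySetD]

theorem pvRowLen_setCell (b : List (List String)) (i c : Int) (v : String) (hi : 0 ≤ i)
    (d : Nat) : ((pvSetCell b i c v).getD d []).length = ((b.getD d []).length) := by
  rw [pvSetCell_nonneg _ _ _ _ hi]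
  by_cases hd : i.toNat = d
  · subst hd
    by_cases hlt : i.toNat < b.length
    · simp [List.getD_eq_getElem?_getD, List.getElem?_set_self hlt,
        PySem.List.length_pySetD]
    · rw [List.set_eq_of_length_le (by omega : b.length ≤ i.toNat)]
  · simp [List.getD_eq_getElem?_getD, List.getElem?_set_ne hd]

theorem pvCell_setCell_ne (b : List (List String)) (i j c : Int) (v : String)
    (hi : 0 ≤ i) (hj : 0 ≤ j) (hne : j ≠ i) :
    pvCell (pvSetCell b i c v) j c = pvCell b j c := by
  rw [pvSetCell_nonneg _ _ _ _ hi]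
  simp [pvCell, PySem.List.pyGet?_of_nonneg _ hj,
    List.getElem?_set_ne (by omega : i.toNat ≠ j.toNat)]

theorem pvCell_setCell_self (b : List (List String)) (i c : Int) (v : String)
    (hi : 0 ≤ i) (hc : 0 ≤ c) (hlen : i < (b.length : Int))
    (hrow : c < ((b.getD i.toNat []).length : Int)) :
    pvCell (pvSetCell b i c v) i c = v := by
  rw [pvSetCell_nonneg _ _ _ _ hi, pvCell_nonneg _ _ _ hi hc,
    pvPySetD_nonneg _ _ _ hc]
  have h1 : i.toNat < b.length := by omega
  have h2 : c.toNat < (b.getD i.toNat []).length := by omega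
  simp [List.getD_eq_getElem?_getD, List.getElem?_set_self h1,
    List.getElem?_set_self (by simpa using h2)]

theorem pvSetCell_same (b : List (List String)) (i c : Int) (v : String)
    (hi : 0 ≤ i) (hc : 0 ≤ c) (h : pvCell b i c = v) :
    pvSetCell b i c v = b := by
  rw [pvCell_nonneg _ _ _ hi hc] at h
  rw [pvSetCell_nonneg _ _ _ _ hi, pvPySetD_nonneg _ _ _ hc]
  by_cases h2 : c.toNat < (b.getD i.toNat []).length
  · have hrow : (b.getD i.toNat []).set c.toNat v = b.getD i.toNat [] := by
      rw [← h, List.getD_eq_getElem _ _ h2]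
      exact List.set_getElem_self h2
    rw [hrow]
    by_cases h1 : i.toNat < b.length
    · rw [List.getD_eq_getElem _ _ h1]
      exact List.set_getElem_self h1
    · exact List.set_eq_of_length_le (by omega)
  · have hrow : (b.getD i.toNat []).set c.toNat v = b.getD i.toNat [] :=
      List.set_eq_of_length_le (by omega)
    rw [hrow]
    by_cases h1 : i.toNat < b.length
    · rw [List.getD_eq_getElem _ _ h1]
      exact List.set_getElem_self h1
    · exact List.set_eq_of_length_le (by omega)

-- the enemy-run of a window: the indices i ≤ d < i+n whose cell equals enemy_turn
def pvEList (e : String) (b : List (List String)) (c : Int) : Nat → Int → List Int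
  | 0, _ => []
  | n+1, i => (if pvCell b i c = e then [i] else []) ++ pvEList e b c n (i+1)

theorem pvEList_mem (e : String) (b : List (List String)) (c : Int) :
    ∀ (n : Nat) (i j : Int), j ∈ pvEList e b c n i → pvCell b j c = e ∧ i ≤ j := by
  intro n
  induction n with
  | zero => intro i j h; simp [pvEList] at h
  | succ m ih =>
    intro i j h
    by_cases hcell : pvCell b i c = e
    · simp [pvEList, hcell] at h
      rcases h with h | h
      · subst h; exact ⟨hcell, le_refl _⟩
      · rcases ih (i+1) j h with ⟨h1, h2⟩; exact ⟨h1, by omega⟩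
    · simp [pvEList, hcell] at h
      rcases ih (i+1) j h with ⟨h1, h2⟩; exact ⟨h1, by omega⟩

theorem pvEList_congr (e : String) (b b' : List (List String)) (c : Int) :
    ∀ (n : Nat) (i : Int),
      (∀ d : Int, i ≤ d → d < i + (n : Int) → pvCell b' d c = pvCell b d c) →
      pvEList e b' c n i = pvEList e b c n i := by
  intro n
  induction n with
  | zero => intro i _; rfl
  | succ m ih =>
    intro i h
    have hi : pvCell b' i c = pvCell b i c := h i (le_refl _) (by push_cast; omega)
    simp only [pvEList, hi]
    rw [ih (i+1) (fun d hd1 hd2 => h d (by omega) (by push_cast at hd2 ⊢; omega))]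

theorem pvCheckCol_dot (e p : String) (b : List (List String)) (c : Int) :
    ∀ (n : Nat) (i : Int) (res : List Int),
      (∃ d : Int, i ≤ d ∧ d < i + (n : Int) ∧
        pvCell b d c ≠ e ∧ pvCell b d c ≠ p ∧ pvCell b d c = ".") →
      pvCheckCol e p b c n i res = [] := by
  intro n
  induction n with
  | zero => intro i res ⟨d, hd1, hd2, _⟩; exfalso; push_cast at hd2; omega
  | succ m ih =>
    intro i res ⟨d, hd1, hd2, hde, hdp, hdd⟩
    push_cast at hd2
    by_cases hcell : pvCell b i c = e
    · have hdi : d ≠ i := fun hh => hde (hh ▸ hcell)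
      simp only [pvCheckCol]
      rw [if_pos hcell]
      exact ih (i+1) _ ⟨d, by omega, by omega, hde, hdp, hdd⟩
    · by_cases hp : pvCell b i c = p
      · have hdi : d ≠ i := fun hh => hdp (hh ▸ hp)
        simp only [pvCheckCol]
        rw [if_neg hcell, if_pos hp]
        exact ih (i+1) _ ⟨d, by omega, by omega, hde, hdp, hdd⟩
      · by_cases hdot : pvCell b i c = "."
        · simp only [pvCheckCol]
          rw [if_neg hcell, if_neg hp, if_pos hdot]
        · have hdi : d ≠ i := fun hh => hdot (hh ▸ hdd)
          simp only [pvCheckCol]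
          rw [if_neg hcell, if_neg hp, if_neg hdot]
          exact ih (i+1) _ ⟨d, by omega, by omega, hde, hdp, hdd⟩

theorem pvCheckCol_clean (e p : String) (b : List (List String)) (c : Int) :
    ∀ (n : Nat) (i : Int) (res : List Int),
      (∀ d : Int, i ≤ d → d < i + (n : Int) →
        (pvCell b d c = e ∨ (pvCell b d c ≠ p ∧ pvCell b d c ≠ "."))) →
      pvCheckCol e p b c n i res = res ++ pvEList e b c n i := by
  intro n
  induction n with
  | zero => intro i res _; simp [pvCheckCol, pvEList]
  | succ m ih =>
    intro i res h
    have hnext : ∀ d : Int, i+1 ≤ d → d < (i+1) + (m : Int) →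
        (pvCell b d c = e ∨ (pvCell b d c ≠ p ∧ pvCell b d c ≠ ".")) :=
      fun d hd1 hd2 => h d (by omega) (by push_cast at hd2 ⊢; omega)
    by_cases hcell : pvCell b i c = e
    · simp only [pvCheckCol, pvEList]
      rw [if_pos hcell, if_pos hcell, ih (i+1) _ hnext]
      simp
    · rcases h i (le_refl _) (by push_cast; omega) with hc' | ⟨hp, hdot⟩
      · exact absurd hc' hcell
      · simp only [pvCheckCol, pvEList]
        rw [if_neg hcell, if_neg hp, if_neg hdot, if_neg hcell, ih (i+1) _ hnext]
        simp

theorem pvFoldl_noop (b : List (List String)) (c : Int) (p : String) :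
    ∀ (l : List Int), (∀ j ∈ l, pvSetCell b j c p = b) →
      l.foldl (fun bb j => pvSetCell bb j c p) b = b := by
  intro l
  induction l with
  | nil => intro _; rfl
  | cons x xs ih =>
    intro h
    simp only [List.foldl_cons, h x (by simp)]
    exact ih (fun j hj => h j (by simp [hj]))

-- B's interleaved flip loop equals A's fold of the precomputed enemy list
theorem pvFlip_eq_foldl (e p : String) (c : Int) :
    ∀ (n : Nat) (i : Int) (b : List (List String)), 0 ≤ i →
      pvFlip e p c n i b = (pvEList e b c n i).foldl (fun bb j => pvSetCell bb j c p) b := by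
  intro n
  induction n with
  | zero => intro i b _; simp [pvFlip, pvEList]
  | succ m ih =>
    intro i b hi
    by_cases hcell : pvCell b i c = e
    · simp only [pvFlip, pvEList, hcell, ite_true, List.singleton_append, List.foldl_cons]
      rw [ih (i+1) (pvSetCell b i c p) (by omega)]
      congr 1
      exact pvEList_congr e b (pvSetCell b i c p) c m (i+1)
        (fun d hd1 hd2 => pvCell_setCell_ne b i d c p hi (by omega) (by omega))
    · simp only [pvFlip, pvEList, hcell, ite_false, List.nil_append]
      exact ih (i+1) b (by omega)

theorem pvFlip_lower (e p : String) (c : Int) :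
    ∀ (n : Nat) (i : Int) (b : List (List String)) (j : Int), 0 ≤ j → j < i →
      pvCell (pvFlip e p c n i b) j c = pvCell b j c := by
  intro n
  induction n with
  | zero => intro i b j _ _; rfl
  | succ m ih =>
    intro i b j hj hji
    by_cases hcell : pvCell b i c = e
    · simp only [pvFlip, hcell, ite_true]
      rw [ih (i+1) _ j hj (by omega)]
      exact pvCell_setCell_ne b i j c p (by omega) hj (by omega)
    · simp only [pvFlip, hcell, ite_false]
      exact ih (i+1) b j hj (by omega)

theorem pvCell_pvFlip (e p : String) (c : Int) (hc : 0 ≤ c) :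
    ∀ (n : Nat) (i : Int) (b : List (List String)) (j : Int),
      0 ≤ i → i ≤ j → j < i + (n : Int) → j < (b.length : Int) →
      c < ((b.getD j.toNat []).length : Int) →
      pvCell (pvFlip e p c n i b) j c = if pvCell b j c = e then p else pvCell b j c := by
  intro n
  induction n with
  | zero => intro i b j _ hij hjn _ _; exfalso; push_cast at hjn; omega
  | succ m ih =>
    intro i b j hi hij hjn hjlen hjrow
    push_cast at hjn
    by_cases hcell : pvCell b i c = e
    · simp only [pvFlip, hcell, ite_true]
      by_cases hji : j = i
      · subst hji
        rw [pvFlip_lower e p c m (j+1) _ j (by omega) (by omega)]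
        rw [pvCell_setCell_self b j c p (by omega) hc hjlen hjrow]
        simp [hcell]
      · have hcongr : pvCell (pvSetCell b i c p) j c = pvCell b j c :=
          pvCell_setCell_ne b i j c p hi (by omega) hji
        rw [ih (i+1) (pvSetCell b i c p) j (by omega) (by omega)
          (by omega)
          (by rw [pvLen_setCell]; omega)
          (by rw [pvRowLen_setCell b i c p hi j.toNat]; omega)]
        rw [hcongr]
    · simp only [pvFlip, hcell, ite_false]
      by_cases hji : j = i
      · subst hji
        rw [pvFlip_lower e p c m (j+1) b j (by omega) (by omega)]
        simp [hcell]
      · exact ih (i+1) b j (by omega) (by omega) (by omega) hjlen hjrow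

theorem pvDownLoop_guardFalse (pm : List Int) (e p : String) (b : List (List String))
    (h : pvCell b (pvIdx pm 0 + 1) (pvIdx pm 1) ≠ e) :
    ∀ (n : Nat) (i : Int), pvDownLoop pm e p n i b = b := by
  intro n
  induction n with
  | zero => intro i; rfl
  | succ m ih =>
    intro i
    simp only [pvDownLoop, h, ite_false]
    exact ih (i+1)

theorem pvDownLoop_dotFrozen (pm : List Int) (e p : String) (b : List (List String)) :
    ∀ (n : Nat) (i : Int),
      (∃ d : Int, pvIdx pm 0 + 1 ≤ d ∧ d < i ∧
        pvCell b d (pvIdx pm 1) ≠ e ∧ pvCell b d (pvIdx pm 1) ≠ p ∧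
        pvCell b d (pvIdx pm 1) = ".") →
      pvDownLoop pm e p n i b = b := by
  intro n
  induction n with
  | zero => intro i _; rfl
  | succ m ih =>
    intro i ⟨d, hd1, hd2, hde, hdp, hdd⟩
    have hstep :
        (if pvCell b (pvIdx pm 0 + 1) (pvIdx pm 1) = e then
          if pvCell b i (pvIdx pm 1) = p then
            (pvCheckCol e p b (pvIdx pm 1) ((i - (pvIdx pm 0 + 1)).toNat)
                (pvIdx pm 0 + 1) []).foldl
              (fun bb j => pvSetCell bb j (pvIdx pm 1) p) b
          else b
         else b) = b := by
      by_cases hg : pvCell b (pvIdx pm 0 + 1) (pvIdx pm 1) = e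
      · by_cases hp : pvCell b i (pvIdx pm 1) = p
        · rw [pvCheckCol_dot e p b (pvIdx pm 1) ((i - (pvIdx pm 0 + 1)).toNat)
            (pvIdx pm 0 + 1) [] ⟨d, hd1, by omega, hde, hdp, hdd⟩]
          simp [hg, hp]
        · simp [hg, hp]
      · simp [hg]
    simp only [pvDownLoop, hstep]
    exact ih (i+1) ⟨d, hd1, by omega, hde, hdp, hdd⟩

-- the simulation: from any point i ≥ r0+1 of the loop with only enemy/junk cells behind,
-- A's remaining loop equals B's scan
theorem pvSim (pm : List Int) (e p : String) (b : List (List String)) (rownum : Int)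
    (h0r : 0 ≤ pvIdx pm 0) (h0c : 0 ≤ pvIdx pm 1)
    (hguard : pvCell b (pvIdx pm 0 + 1) (pvIdx pm 1) = e)
    (hlen : rownum ≤ (b.length : Int))
    (hrows : ∀ d : Int, pvIdx pm 0 ≤ d → d < rownum →
      pvIdx pm 1 < ((b.getD d.toNat []).length : Int)) :
    ∀ (n : Nat) (i : Int), pvIdx pm 0 + 1 ≤ i → i + (n : Int) = rownum →
      (∀ d : Int, pvIdx pm 0 + 1 ≤ d → d < i →
        (pvCell b d (pvIdx pm 1) = e ∨
          (pvCell b d (pvIdx pm 1) ≠ p ∧ pvCell b d (pvIdx pm 1) ≠ "."))) →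
      pvDownLoop pm e p n i b = pvScan e p (pvIdx pm 0) (pvIdx pm 1) n i b := by
  intro n
  induction n with
  | zero => intro i _ _ _; rfl
  | succ m ih =>
    intro i hi hin hclean
    push_cast at hin
    by_cases hcell : pvCell b i (pvIdx pm 1) = e
    · -- enemy cell: A's step leaves the board unchanged, both loops continue
      have hA : pvDownLoop pm e p (m+1) i b = pvDownLoop pm e p m (i+1) b := by
        by_cases hp : pvCell b i (pvIdx pm 1) = p
        · have hep : e = p := hcell ▸ hp
          have hfold : (pvCheckCol e p b (pvIdx pm 1) ((i - (pvIdx pm 0 + 1)).toNat)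
                (pvIdx pm 0 + 1) []).foldl
              (fun bb j => pvSetCell bb j (pvIdx pm 1) p) b = b := by
            rw [pvCheckCol_clean e p b (pvIdx pm 1) ((i - (pvIdx pm 0 + 1)).toNat)
              (pvIdx pm 0 + 1) []
              (fun d hd1 hd2 => hclean d hd1 (by omega)),
              List.nil_append]
            exact pvFoldl_noop b (pvIdx pm 1) p _ (fun j hj => by
              rcases pvEList_mem e b (pvIdx pm 1) _ _ j hj with ⟨hje, hjge⟩
              exact pvSetCell_same b j (pvIdx pm 1) p (by omega) h0c (hje.trans hep))
          simp only [pvDownLoop]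
          rw [if_pos hguard, if_pos hp, hfold]
        · simp only [pvDownLoop]
          rw [if_pos hguard, if_neg hp]
      have hB : pvScan e p (pvIdx pm 0) (pvIdx pm 1) (m+1) i b =
          pvScan e p (pvIdx pm 0) (pvIdx pm 1) m (i+1) b := by
        simp only [pvScan]
        rw [if_pos hcell]
      rw [hA, hB]
      exact ih (i+1) (by omega) (by omega)
        (fun d hd1 hd2 => by
          by_cases hdi : d = i
          · exact Or.inl (hdi ▸ hcell)
          · exact hclean d hd1 (by omega))
    · by_cases hp : pvCell b i (pvIdx pm 1) = p
      · -- the flip event: both produce the flipped board, then A's guard is dead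
        have hpe : p ≠ e := fun hh => hcell (hp.trans hh)
        have hii : pvIdx pm 0 + 1 < i := by
          rcases lt_or_eq_of_le hi with hlt | heq
          · exact hlt
          · exact absurd (heq ▸ hguard) hcell
        have hE := pvCheckCol_clean e p b (pvIdx pm 1) ((i - (pvIdx pm 0 + 1)).toNat)
          (pvIdx pm 0 + 1) []
          (fun d hd1 hd2 => hclean d hd1 (by omega))
        rw [List.nil_append] at hE
        have hflip := pvFlip_eq_foldl e p (pvIdx pm 1) ((i - (pvIdx pm 0 + 1)).toNat)
          (pvIdx pm 0 + 1) b (by omega)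
        have hcellflip : pvCell (pvFlip e p (pvIdx pm 1) ((i - (pvIdx pm 0 + 1)).toNat)
            (pvIdx pm 0 + 1) b) (pvIdx pm 0 + 1) (pvIdx pm 1) = p := by
          rw [pvCell_pvFlip e p (pvIdx pm 1) h0c ((i - (pvIdx pm 0 + 1)).toNat)
            (pvIdx pm 0 + 1) b (pvIdx pm 0 + 1) (by omega) (le_refl _)
            (by omega) (by omega)
            (hrows (pvIdx pm 0 + 1) (by omega) (by omega)), if_pos hguard]
        have hA : pvDownLoop pm e p (m+1) i b =
            pvDownLoop pm e p m (i+1)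
              ((pvCheckCol e p b (pvIdx pm 1) ((i - (pvIdx pm 0 + 1)).toNat)
                  (pvIdx pm 0 + 1) []).foldl
                (fun bb j => pvSetCell bb j (pvIdx pm 1) p) b) := by
          simp only [pvDownLoop]
          rw [if_pos hguard, if_pos hp]
        have hB : pvScan e p (pvIdx pm 0) (pvIdx pm 1) (m+1) i b =
            pvFlip e p (pvIdx pm 1) ((i - (pvIdx pm 0 + 1)).toNat) (pvIdx pm 0 + 1) b := by
          simp only [pvScan]
          rw [if_neg hcell, if_pos hp]
        rw [hA, hB, hE, ← hflip]
        exact pvDownLoop_guardFalse pm e p _ (by rw [hcellflip]; exact hpe) m (i+1)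
      · by_cases hdot : pvCell b i (pvIdx pm 1) = "."
        · -- blocked column: A never flips again, B breaks
          have hA : pvDownLoop pm e p (m+1) i b = pvDownLoop pm e p m (i+1) b := by
            simp only [pvDownLoop]
            rw [if_pos hguard, if_neg hp]
          have hB : pvScan e p (pvIdx pm 0) (pvIdx pm 1) (m+1) i b = b := by
            simp only [pvScan]
            rw [if_neg hcell, if_neg hp, if_pos hdot]
          rw [hA, hB]
          exact pvDownLoop_dotFrozen pm e p b m (i+1) ⟨i, hi, by omega, hcell, hp, hdot⟩
        · -- junk cell: both loops skip it
          have hA : pvDownLoop pm e p (m+1) i b = pvDownLoop pm e p m (i+1) b := by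
            simp only [pvDownLoop]
            rw [if_pos hguard, if_neg hp]
          have hB : pvScan e p (pvIdx pm 0) (pvIdx pm 1) (m+1) i b =
              pvScan e p (pvIdx pm 0) (pvIdx pm 1) m (i+1) b := by
            simp only [pvScan]
            rw [if_neg hcell, if_neg hp, if_neg hdot]
          rw [hA, hB]
          exact ih (i+1) (by omega) (by omega)
            (fun d hd1 hd2 => by
              by_cases hdi : d = i
              · exact Or.inr (hdi ▸ ⟨hp, hdot⟩)
              · exact hclean d hd1 (by omega))

-- ===== VERDICT (by name: the statement is the Claim_ definition above) =====
theorem makemove_down_py_spec : Claim_equal_makemove_down_py := by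
  unfold Claim_equal_makemove_down_py
  intro board pm e p rownum _ hpre
  unfold Spec_makemove_down_py
  obtain ⟨hlen1, hrest⟩ := hpre
  by_cases hr : rownum ≤ pvIdx pm 0
  · have hz : (rownum - pvIdx pm 0).toNat = 0 := by omega
    simp [makemove_down_py, makemove_down_py_alt, hr, hz, pvDownLoop]
  · rcases hrest with hsmall | ⟨h2, h0r, h0c, hlt, hrowg, hrest2⟩
    · omega
    · by_cases hguard : pvCell board (pvIdx pm 0 + 1) (pvIdx pm 1) = e
      · rcases hrest2 with hne | ⟨hrl, hrows⟩
        · exact absurd hguard hne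
        · have hrows' : ∀ d : Int, pvIdx pm 0 ≤ d → d < rownum →
              pvIdx pm 1 < ((board.getD d.toNat []).length : Int) := by
            intro d hd1 hd2
            have hdlen : d.toNat < board.length := by omega
            have := hrows d.toNat (List.mem_range.mpr hdlen) (by omega) (by omega)
            exact this
          have hfuel : (rownum - pvIdx pm 0).toNat = (rownum - (pvIdx pm 0 + 1)).toNat + 1 := by
            omega
          have h0 : (pvIdx pm 0 - (pvIdx pm 0 + 1)).toNat = 0 := by omega
          have hstep :
              (if pvCell board (pvIdx pm 0 + 1) (pvIdx pm 1) = e then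
                if pvCell board (pvIdx pm 0) (pvIdx pm 1) = p then
                  (pvCheckCol e p board (pvIdx pm 1)
                      ((pvIdx pm 0 - (pvIdx pm 0 + 1)).toNat) (pvIdx pm 0 + 1) []).foldl
                    (fun bb j => pvSetCell bb j (pvIdx pm 1) p) board
                else board
               else board) = board := by
            rw [h0]
            by_cases hp0 : pvCell board (pvIdx pm 0) (pvIdx pm 1) = p
            · simp [hguard, hp0, pvCheckCol]
            · simp [hguard, hp0]
          have hA : makemove_down_py board pm e p rownum =
              pvDownLoop pm e p ((rownum - (pvIdx pm 0 + 1)).toNat) (pvIdx pm 0 + 1) board := by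
            unfold makemove_down_py
            rw [hfuel]
            simp only [pvDownLoop, hstep]
          rw [hA]
          rw [pvSim pm e p board rownum h0r h0c hguard hrl hrows'
            ((rownum - (pvIdx pm 0 + 1)).toNat) (pvIdx pm 0 + 1) (le_refl _)
            (by omega) (fun d hd1 hd2 => absurd (lt_of_le_of_lt hd1 hd2) (by omega))]
          simp [makemove_down_py_alt, hr, hguard]
      · unfold makemove_down_py
        rw [pvDownLoop_guardFalse pm e p board hguard _ _]
        simp [makemove_down_py_alt, hr, hguard]
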